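-- pv_equiv track=rewrite | github.com/alexandraback/datacollection | solutions_5631989306621952_1/Python/Warbler/the_last_word.py | solve
-- ===== SOURCE A (Python) =====
-- def solve(word):
--     lenth=len(word)
--     rslt=word[0]
--     for i in range(1,lenth):
--         if word[i]>=rslt[0]:
--             rslt=word[i]+rslt
--         else:
--             rslt=rslt+word[i]
--     return rslt
-- ===== SOURCE B (Python) =====
-- def solve(word):
--     # Stage 1: table of inclusive running maxima.  A char goes to the front of
--     # the result iff it equals its running maximum; front is emitted reversed.
--     maxes = []
--     m = word[0]
--     for c in word:
--         if m < c:
--             m = c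
--         maxes.append(m)
--     front = [c for c, mx in zip(word, maxes) if c == mx]
--     back = [c for c, mx in zip(word, maxes) if c != mx]
--     return ''.join(reversed(front)) + ''.join(back)
-- ===== Notes on version B (the rewrite author's own statement) =====
-- stated objective: faster
-- what changed: Replaces A's inline two-ended string concatenation with a staged algorithm: first build the table of inclusive running maxima, then partition characters by equality with their table entry and join front-reversed plus back once.
import Mathlib
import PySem

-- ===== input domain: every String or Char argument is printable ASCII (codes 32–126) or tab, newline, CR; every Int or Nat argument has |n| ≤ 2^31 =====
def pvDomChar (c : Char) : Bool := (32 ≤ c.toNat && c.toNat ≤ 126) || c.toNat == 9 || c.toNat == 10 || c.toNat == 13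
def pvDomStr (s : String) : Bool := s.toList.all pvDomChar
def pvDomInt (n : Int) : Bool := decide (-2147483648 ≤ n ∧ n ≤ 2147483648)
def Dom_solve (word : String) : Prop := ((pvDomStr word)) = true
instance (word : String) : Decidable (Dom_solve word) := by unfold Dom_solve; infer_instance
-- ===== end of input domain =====

-- B replaces A's two-ended string concatenation with a staged algorithm: a running-maxima
-- table, an equality partition against it, and one final join (faster in a timing run);
-- Pre_ excludes "" (A raises IndexError at word[0]; B raises there too).


-- ===== PORT A =====
def solve (word : String) : String :=
  let cs := word.toList
  let lenth : Int := cs.length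
  -- rslt = word[0]; under Pre_solve the index is in range (Python raises IndexError on "")
  let rslt : List Char := [PySem.List.pyGetD cs 0 ' ']
  let rslt := (PySem.List.pyRange 1 lenth 1).foldl
    (fun rslt i =>
      if PySem.List.pyGetD rslt 0 ' ' ≤ PySem.List.pyGetD cs i ' '
      then PySem.List.pyGetD cs i ' ' :: rslt
      else rslt ++ [PySem.List.pyGetD cs i ' ']) rslt
  String.ofList rslt

-- ===== PORT B =====
def solve_alt (word : String) : String :=
  let cs := word.toList
  -- m = word[0]; maxes built by one pass (Python raises IndexError on "")
  let maxes := (cs.foldl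
      (fun (s : Char × List Char) c =>
        let m := if s.1 < c then c else s.1
        (m, s.2 ++ [m]))
      (PySem.List.pyGetD cs 0 ' ', [])).2
  let front := ((cs.zip maxes).filter (fun p => p.1 == p.2)).map Prod.fst
  let back := ((cs.zip maxes).filter (fun p => p.1 != p.2)).map Prod.fst
  String.ofList (front.reverse ++ back)

-- ===== PRECONDITION & SPEC =====
-- Pre_ excludes only the empty string, on which both Pythons raise IndexError at word[0].
def Pre_solve (word : String) : Prop := word ≠ ""
instance (word : String) : Decidable (Pre_solve word) := by unfold Pre_solve; infer_instance
def pvWitness_solve : String := "ba"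

def Spec_solve (word : String) (out : String) : Prop := out = solve_alt word
instance (word : String) (out : String) : Decidable (Spec_solve word out) := by unfold Spec_solve; infer_instance

-- ===== CLAIM (what is proved, stated in full; the proofs are below) =====
def Claim_equal_solve : Prop := ∀ (word : String), Dom_solve word → Pre_solve word → Spec_solve word (solve word)

-- ===== LEMMAS AND PROOFS =====

-- A's step, after the index loop has been turned into a fold over the characters.
def stepA (rslt : List Char) (c : Char) : List Char :=
  if PySem.List.pyGetD rslt 0 ' ' ≤ c then c :: rslt else rslt ++ [c]

def nextMax (m c : Char) : Char := if m < c then c else m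

-- running-maxima table of the rest, given current maximum m
def maxesList (m : Char) : List Char → List Char
  | [] => []
  | c :: r => nextMax m c :: maxesList (nextMax m c) r

-- the front/back partition both programs compute, given current maximum m;
-- .1 is the front in original order, .2 the back in original order
def go (m : Char) : List Char → List Char × List Char
  | [] => ([], [])
  | c :: r =>
    if m ≤ c then (c :: (go c r).1, (go c r).2)
    else ((go m r).1, c :: (go m r).2)

theorem go_cons_le {m c : Char} (r : List Char) (h : m ≤ c) :
    go m (c :: r) = (c :: (go c r).1, (go c r).2) := by simp [go, h]

theorem go_cons_lt {m c : Char} (r : List Char) (h : ¬ m ≤ c) :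
    go m (c :: r) = ((go m r).1, c :: (go m r).2) := by simp [go, h]

theorem nextMax_of_le {m c : Char} (h : m ≤ c) : nextMax m c = c := by
  unfold nextMax; rcases lt_or_eq_of_le h with h' | h' <;> simp [h']

theorem nextMax_of_not_le {m c : Char} (h : ¬ m ≤ c) : nextMax m c = m := by
  unfold nextMax; rw [if_neg (fun hlt => h (le_of_lt hlt))]

theorem beq_false_of_not_le {m c : Char} (h : ¬ m ≤ c) : (c == m) = false :=
  beq_eq_false_iff_ne.mpr (fun e => h (e ▸ le_refl c))

-- A's loop, expressed against the go partition
theorem loopA_eq : ∀ (rest : List Char) (m : Char) (fr back : List Char),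
    rest.foldl stepA ((m :: fr) ++ back)
      = ((go m rest).1.reverse ++ (m :: fr)) ++ (back ++ (go m rest).2) := by
  intro rest
  induction rest with
  | nil => intro m fr back; simp [go]
  | cons x r ih =>
    intro m fr back
    by_cases h : m ≤ x
    · have hA : stepA ((m :: fr) ++ back) x = (x :: m :: fr) ++ back := by
        simp [stepA, PySem.List.pyGetD_zero_cons, h]
      simp only [List.foldl_cons, hA, go_cons_le r h, ih x (m :: fr) back]
      simp
    · have hA : stepA ((m :: fr) ++ back) x = (m :: fr) ++ (back ++ [x]) := by
        simp [stepA, PySem.List.pyGetD_zero_cons, h]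
      simp only [List.foldl_cons, hA, go_cons_lt r h, ih m fr (back ++ [x])]
      simp

-- B's maxes fold builds acc ++ maxesList
theorem maxes_fold : ∀ (rest : List Char) (m : Char) (acc : List Char),
    (rest.foldl (fun (s : Char × List Char) c =>
        let m' := if s.1 < c then c else s.1
        (m', s.2 ++ [m'])) (m, acc)).2 = acc ++ maxesList m rest := by
  intro rest
  induction rest with
  | nil => intro m acc; simp [maxesList]
  | cons x r ih =>
    intro m acc
    simp only [List.foldl_cons, maxesList]
    rw [show (if m < x then x else m) = nextMax m x from rfl, ih]
    simp

-- the equality partition against the maxes table is exactly go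
theorem front_filter : ∀ (rest : List Char) (m : Char),
    ((rest.zip (maxesList m rest)).filter (fun p => p.1 == p.2)).map Prod.fst
      = (go m rest).1 := by
  intro rest
  induction rest with
  | nil => intro m; simp [maxesList, go]
  | cons x r ih =>
    intro m
    by_cases h : m ≤ x
    · simp [maxesList, nextMax_of_le h, go_cons_le r h, ih x]
    · simp [maxesList, List.filter_cons, nextMax_of_not_le h, go_cons_lt r h, ih m,
        beq_false_of_not_le h]

theorem back_filter : ∀ (rest : List Char) (m : Char),
    ((rest.zip (maxesList m rest)).filter (fun p => p.1 != p.2)).map Prod.fst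
      = (go m rest).2 := by
  intro rest
  induction rest with
  | nil => intro m; simp [maxesList, go]
  | cons x r ih =>
    intro m
    by_cases h : m ≤ x
    · simp [maxesList, nextMax_of_le h, go_cons_le r h, ih x]
    · have hb : (x != m) = true := by simp [bne, beq_false_of_not_le h]
      simp [maxesList, List.filter_cons, nextMax_of_not_le h, go_cons_lt r h, hb, ih m]

-- ===== VERDICT (by name: the statement is the Claim_ definition above) =====
theorem solve_spec : Claim_equal_solve := by
  unfold Claim_equal_solve
  intro word _ hpre
  unfold Spec_solve solve solve_alt
  obtain ⟨c, rest, hcs⟩ : ∃ c rest, word.toList = c :: rest := by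
    cases hl : word.toList with
    | nil => exact absurd (by cases word; simpa using hl) hpre
    | cons c rest => exact ⟨c, rest, rfl⟩
  simp only [hcs]
  -- reduce A's indexed loop to a fold over the characters
  rw [show (fun (rslt : List Char) (i : Int) =>
        if PySem.List.pyGetD rslt 0 ' ' ≤ PySem.List.pyGetD (c :: rest) i ' '
        then PySem.List.pyGetD (c :: rest) i ' ' :: rslt
        else rslt ++ [PySem.List.pyGetD (c :: rest) i ' '])
      = (fun acc j => stepA acc (PySem.List.pyGetD (c :: rest) j ' ')) from rfl,
     PySem.List.foldl_pyRange_pyGetD'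
        (xs := c :: rest) (d := ' ') (f := stepA) (a := 1)
        (init := [PySem.List.pyGetD (c :: rest) 0 ' ']) (by norm_num)]
  simp only [PySem.List.pyGetD_zero_cons, Int.toNat_one, List.drop_succ_cons, List.drop_zero,
    List.foldl_cons, lt_irrefl, if_false, List.nil_append]
  refine congrArg String.ofList ?_
  -- A side via the invariant
  have hA := loopA_eq rest c [] []
  simp only [List.append_nil, List.nil_append] at hA
  rw [hA]
  -- B side via the maxes table and the partition lemmas
  rw [maxes_fold rest c [c]]
  simp only [List.singleton_append, List.zip_cons_cons, List.filter_cons, List.map_cons,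
    beq_self_eq_true, bne_self_eq_false, if_true, if_false, Bool.false_eq_true,
    front_filter rest c, back_filter rest c]
  simp
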